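-- pv_equiv track=rewrite | github.com/modemobpsycho/python-course-s1-2 | 100. tinkoff/tinkoff_3.py | can_contact
-- ===== SOURCE A (Python) =====
-- def can_contact(n, thresholds):
--     max_threshold = max(thresholds)
--
--     if max_threshold >= n - 1:
--         return "Yes"
--
--     threshold_counts = {}
--     for threshold in thresholds:
--         if threshold not in threshold_counts:
--             threshold_counts[threshold] = 0
--         threshold_counts[threshold] += 1
--
--     for count in threshold_counts.values():
--         if count >= 3:
--             return "No"
--
--     return "Yes"
-- ===== SOURCE B (Python) =====
-- def can_contact(n, thresholds):
--     max_threshold = max(thresholds)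
--     if max_threshold >= n - 1:
--         return "Yes"
--     s = sorted(thresholds)
--     for a, b, c in zip(s, s[1:], s[2:]):
--         if a == b == c:
--             return "No"
--     return "Yes"
-- ===== Notes on version B (the rewrite author's own statement) =====
-- stated objective: alternative
-- what changed: Replaces the frequency-dict pass and its values scan by sorting a copy and scanning consecutive triples of the sorted list for three equal values.
import Mathlib
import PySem

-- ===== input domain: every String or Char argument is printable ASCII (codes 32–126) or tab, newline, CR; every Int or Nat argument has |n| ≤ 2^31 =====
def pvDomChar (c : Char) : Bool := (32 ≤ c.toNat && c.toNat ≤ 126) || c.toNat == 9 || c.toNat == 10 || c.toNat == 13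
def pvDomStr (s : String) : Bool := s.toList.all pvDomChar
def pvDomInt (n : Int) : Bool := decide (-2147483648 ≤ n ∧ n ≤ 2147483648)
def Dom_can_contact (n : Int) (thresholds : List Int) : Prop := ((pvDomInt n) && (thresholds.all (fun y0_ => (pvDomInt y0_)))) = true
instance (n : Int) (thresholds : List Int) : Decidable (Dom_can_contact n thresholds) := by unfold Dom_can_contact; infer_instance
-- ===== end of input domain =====

-- B replaces A's frequency dict + values scan by sorting a copy and scanning consecutive
-- triples of the sorted list; alternative decomposition, same return value.

-- ===== PORT A =====
def can_contact (n : Int) (thresholds : List Int) : String :=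
  match PySem.List.max? thresholds (fun x => x) with
  | none => ""  -- max([]) raises ValueError; excluded by Pre_can_contact
  | some max_threshold =>
    if max_threshold ≥ n - 1 then "Yes"
    else
      let threshold_counts : PySem.Dict Int Int :=
        thresholds.foldl (fun d t =>
          let d := if d.contains t then d else d.insert t 0
          d.modify t 0 (· + 1)) PySem.Dict.empty
      if threshold_counts.values.any (fun c => 3 ≤ c) then "No" else "Yes"

-- ===== PORT B =====
-- walk of zip(s, s[1:], s[2:]) looking for a == b == c
def hasTripleRun : List Int → Bool
  | a :: b :: c :: t => if a = b ∧ b = c then true else hasTripleRun (b :: c :: t)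
  | _ => false

def can_contact_alt (n : Int) (thresholds : List Int) : String :=
  match PySem.List.max? thresholds (fun x => x) with
  | none => ""  -- max([]) raises ValueError; excluded by Pre_can_contact
  | some max_threshold =>
    if max_threshold ≥ n - 1 then "Yes"
    else
      let s := PySem.List.sorted thresholds (fun x => x) false
      if hasTripleRun s then "No" else "Yes"

-- ===== PRECONDITION & SPEC =====
-- Pre_ excludes only the empty list, on which A (and B) raise ValueError from max([]).
def Pre_can_contact (_n : Int) (thresholds : List Int) : Prop := thresholds ≠ []
instance (n : Int) (thresholds : List Int) : Decidable (Pre_can_contact n thresholds) := by unfold Pre_can_contact; infer_instance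
def pvWitness_can_contact : Int × List Int := (5, [1, 2])

def Spec_can_contact (n : Int) (thresholds : List Int) (out : String) : Prop := out = can_contact_alt n thresholds
instance (n : Int) (thresholds : List Int) (out : String) : Decidable (Spec_can_contact n thresholds out) := by unfold Spec_can_contact; infer_instance

-- ===== CLAIM (what is proved, stated in full; the proofs are below) =====
def Claim_equal_can_contact : Prop := ∀ (n : Int) (thresholds : List Int), Dom_can_contact n thresholds → Pre_can_contact n thresholds → Spec_can_contact n thresholds (can_contact n thresholds)

-- ===== LEMMAS AND PROOFS =====

-- A's "if t not in d: d[t] = 0; d[t] += 1" step equals Counter's modify step.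
theorem step_eq (d : PySem.Dict Int Int) (t : Int) :
    (if d.contains t then d else d.insert t 0).modify t 0 (· + 1) = d.modify t 0 (· + 1) := by
  by_cases h : d.contains t
  · rw [if_pos h]
  · rw [if_neg h]
    have h0 : d.getD t 0 = 0 := PySem.Dict.getD_of_not_contains d 0 (by simpa using h)
    simp [PySem.Dict.modify, PySem.Dict.getD_insert_self, PySem.Dict.insert_insert_self, h0]

theorem fold_eq_counter (xs : List Int) :
    xs.foldl (fun d t =>
      let d := if d.contains t then d else d.insert t 0
      d.modify t 0 (· + 1)) PySem.Dict.empty = PySem.Dict.counter xs := by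
  rw [PySem.Dict.counter_eq_foldl]
  congr 1
  funext d t
  exact step_eq d t

theorem values_any_iff (xs : List Int) :
    ((PySem.Dict.counter xs).values.any (fun c => 3 ≤ c) = true) ↔ ∃ x, 3 ≤ xs.count x := by
  simp only [PySem.Dict.values, PySem.Dict.items_counter, List.map_map, List.any_eq_true,
    List.mem_map, Function.comp]
  constructor
  · rintro ⟨c, ⟨x, hx, rfl⟩, h3⟩
    exact ⟨x, by exact_mod_cast of_decide_eq_true h3⟩
  · rintro ⟨x, h3⟩
    have hxmem : x ∈ xs := by
      by_contra hx
      simp [List.count_eq_zero_of_not_mem hx] at h3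
    exact ⟨(xs.count x : Int), ⟨x, (PySem.Set.mem_ofList xs x).mpr hxmem, rfl⟩,
      decide_eq_true (by exact_mod_cast h3)⟩

theorem tripleRun_iff (s : List Int) : s.Pairwise (· ≤ ·) → (hasTripleRun s = true ↔ ∃ x, 3 ≤ s.count x) := by
  induction s using hasTripleRun.induct with
  | case1 a b c t habc =>
    intro _
    obtain ⟨hab, hbc⟩ := habc
    subst hab; subst hbc
    refine Iff.intro (fun _ => ⟨a, ?_⟩) (fun _ => by simp [hasTripleRun])
    simp
  | case2 a b c t habc ih =>
    intro hp
    rw [hasTripleRun, if_neg habc]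
    have hp' : (b :: c :: t).Pairwise (· ≤ ·) := hp.tail
    rw [ih hp']
    constructor
    · rintro ⟨x, hx⟩
      refine ⟨x, le_trans hx ?_⟩
      simp [List.count_cons]
    · rintro ⟨x, hx⟩
      by_cases hxa : x = a
      · subst hxa
        exfalso
        have hab : x ≤ b := (List.pairwise_cons.mp hp).1 b (by simp)
        have hxc : x ≤ c := (List.pairwise_cons.mp hp).1 c (by simp)
        have hc2 : 2 ≤ (b :: c :: t).count x := by
          simp only [List.count_cons_self] at hx
          omega
        have hb : b = x := by
          by_contra hne
          have h2 : 2 ≤ (c :: t).count x := by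
            simpa [List.count_cons, hne] using hc2
          have hmem : x ∈ c :: t := List.count_pos_iff.mp (by omega)
          have hbx : b ≤ x := (List.pairwise_cons.mp hp').1 x hmem
          exact hne (le_antisymm hbx hab)
        have h1 : 1 ≤ (c :: t).count x := by
          subst hb
          simpa [List.count_cons_self] using hc2
        have hc : c = x := by
          by_contra hne
          have hmem : x ∈ t := by
            have : x ∈ c :: t := List.count_pos_iff.mp (by omega)
            simpa [hne, Ne.symm hne, List.mem_cons] using this
          have hcx : c ≤ x := (List.pairwise_cons.mp hp'.tail).1 x hmem
          exact hne (le_antisymm hcx hxc)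
        exact habc ⟨hb.symm, by rw [hb, hc]⟩
      · refine ⟨x, le_trans hx ?_⟩
        simp [List.count_cons, Ne.symm hxa]
  | case3 s h1 =>
    intro _
    rw [hasTripleRun.eq_def]
    constructor
    · intro h
      split at h
      · exact absurd rfl (h1 _ _ _ _)
      · cases h
    · rintro ⟨x, hx⟩
      exfalso
      have := List.count_le_length (l := s) (a := x)
      match s, h1 with
      | [], _ => simp at hx
      | [a], _ => simp [List.count_cons] at hx; split_ifs at hx <;> omega
      | [a, b], _ => simp [List.count_cons] at hx; split_ifs at hx <;> omega
      | a :: b :: c :: t, h1 => exact absurd rfl (h1 a b c t)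

-- ===== VERDICT (by name: the statement is the Claim_ definition above) =====
theorem can_contact_spec : Claim_equal_can_contact := by
  intro n xs _ hpre
  unfold Spec_can_contact can_contact can_contact_alt
  cases hmax : PySem.List.max? xs (fun x => x) with
  | none => rfl
  | some m =>
    by_cases hge : m ≥ n - 1
    · simp [hge]
    · simp only [hge, if_false]
      rw [fold_eq_counter]
      have h1 := values_any_iff xs
      have h2 := tripleRun_iff (PySem.List.sorted xs (fun x => x) false)
        (PySem.List.sorted_pairwise xs (fun x => x))
      have hcount : ∀ x, (PySem.List.sorted xs (fun x => x) false).count x = xs.count x := by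
        intro x
        exact (PySem.List.sorted_perm xs (fun x => x) false).count_eq x
      simp only [hcount] at h2
      by_cases hany : (PySem.Dict.counter xs).values.any (fun c => 3 ≤ c) = true
      · rw [hany, if_pos (h2.mpr (h1.mp hany))]
        rfl
      · have h3 : hasTripleRun (PySem.List.sorted xs (fun x => x) false) = false := by
          rw [Bool.eq_false_iff]
          intro h
          exact hany (h1.mpr (h2.mp h))
        simp only [Bool.not_eq_true] at hany
        rw [hany, h3]
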